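-- pv_equiv track=rewrite | github.com/durszlaczek/subframe_detector | got_matcher/subframe_detection.py | reformat_points
-- ===== SOURCE A (Python) =====
-- def reformat_points(points):
--     # points like here: https://www.mobilefish.com/services/record_mouse_coordinates/record_mouse_coordinates.php
--     assert len(points) == 4
--     x = sorted([p[0] for p in points])
--     y = sorted([p[1] for p in points])
--
--     # AAAA! I will die soon...
--     # return [
--     #     [x[0], y[0], x[2], y[1]],
--     #     [x[2], y[1], x[3], y[3]],
--     #     [x[0], y[0], x[1], y[2]],
--     #     [x[1], y[2], x[3], y[3]]
--     # ]
--     return [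
--         [x[0], y[0], x[3], y[0]],
--         [x[3], y[0], x[3], y[3]],
--         [x[0], y[0], x[0], y[3]],
--         [x[0], y[3], x[3], y[3]]
--     ]
-- ===== SOURCE B (Python) =====
-- def reformat_points(points):
--     assert len(points) == 4
--     (x0, y0), *rest = points
--     x3, y3 = x0, y0
--     for px, py in rest:
--         if px < x0: x0 = px
--         if px > x3: x3 = px
--         if py < y0: y0 = py
--         if py > y3: y3 = py
--     return [
--         [x0, y0, x3, y0],
--         [x3, y0, x3, y3],
--         [x0, y0, x0, y3],
--         [x0, y3, x3, y3]
--     ]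
-- ===== Notes on version B (the rewrite author's own statement) =====
-- stated objective: alternative
-- what changed: Replaces the two coordinate-list constructions and sorts with a single fold over the point list that maintains the bounding box (x0,y0,x3,y3) as a running accumulator updated per point.
import Mathlib
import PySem

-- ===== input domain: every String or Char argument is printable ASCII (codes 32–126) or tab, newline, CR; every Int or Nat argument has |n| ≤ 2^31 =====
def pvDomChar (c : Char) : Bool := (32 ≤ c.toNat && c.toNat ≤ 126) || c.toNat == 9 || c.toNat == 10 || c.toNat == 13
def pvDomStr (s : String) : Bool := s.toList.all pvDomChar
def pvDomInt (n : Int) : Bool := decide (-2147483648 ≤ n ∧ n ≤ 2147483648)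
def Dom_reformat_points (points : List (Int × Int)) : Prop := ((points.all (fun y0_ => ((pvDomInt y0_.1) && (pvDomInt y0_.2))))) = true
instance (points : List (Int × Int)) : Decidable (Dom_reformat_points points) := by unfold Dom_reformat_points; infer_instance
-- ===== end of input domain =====

-- B replaces A's two coordinate-list builds + sorts with a single fold over the points
-- carrying the bounding box (x0, y0, x3, y3) as a running accumulator (alternative decomposition).

-- ===== PORT A =====
-- A sorts the x- and y-coordinate lists and indexes positions 0 and 3; under Pre_
-- (length 4) these indices are in range, so pyGetD's default is never used.
def reformat_points (points : List (Int × Int)) : List (List Int) :=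
  let x := PySem.List.sorted (points.map (fun p => p.1)) (fun v => v) false
  let y := PySem.List.sorted (points.map (fun p => p.2)) (fun v => v) false
  [[PySem.List.pyGetD x 0 0, PySem.List.pyGetD y 0 0, PySem.List.pyGetD x 3 0, PySem.List.pyGetD y 0 0],
   [PySem.List.pyGetD x 3 0, PySem.List.pyGetD y 0 0, PySem.List.pyGetD x 3 0, PySem.List.pyGetD y 3 0],
   [PySem.List.pyGetD x 0 0, PySem.List.pyGetD y 0 0, PySem.List.pyGetD x 0 0, PySem.List.pyGetD y 3 0],
   [PySem.List.pyGetD x 0 0, PySem.List.pyGetD y 3 0, PySem.List.pyGetD x 3 0, PySem.List.pyGetD y 3 0]]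

-- ===== PORT B =====
-- B's loop body: four independent conditional updates of the running bounding box.
def bbStep (acc : Int × Int × Int × Int) (p : Int × Int) : Int × Int × Int × Int :=
  let x0 := if p.1 < acc.1 then p.1 else acc.1
  let y0 := if p.2 < acc.2.1 then p.2 else acc.2.1
  let x3 := if p.1 > acc.2.2.1 then p.1 else acc.2.2.1
  let y3 := if p.2 > acc.2.2.2 then p.2 else acc.2.2.2
  (x0, y0, x3, y3)

-- B destructures the first point, folds the rest through bbStep, and emits the segments.
-- The [] branch is unreachable under Pre_ (Python's assert already fails there).
def reformat_points_alt (points : List (Int × Int)) : List (List Int) :=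
  match points with
  | [] => []
  | (x, y) :: rest =>
    let bb := rest.foldl bbStep (x, y, x, y)
    [[bb.1, bb.2.1, bb.2.2.1, bb.2.1],
     [bb.2.2.1, bb.2.1, bb.2.2.1, bb.2.2.2],
     [bb.1, bb.2.1, bb.1, bb.2.2.2],
     [bb.1, bb.2.2.2, bb.2.2.1, bb.2.2.2]]

-- ===== PRECONDITION & SPEC =====
-- Pre_: A's assert requires exactly 4 points; on any other length A raises AssertionError.
def Pre_reformat_points (points : List (Int × Int)) : Prop := points.length = 4
instance (points : List (Int × Int)) : Decidable (Pre_reformat_points points) := by unfold Pre_reformat_points; infer_instance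
def pvWitness_reformat_points : (List (Int × Int)) := [(0, 1), (5, 2), (3, 7), (4, 4)]
def Spec_reformat_points (points : List (Int × Int)) (out : List (List Int)) : Prop := out = reformat_points_alt points
instance (points : List (Int × Int)) (out : List (List Int)) : Decidable (Spec_reformat_points points out) := by unfold Spec_reformat_points; infer_instance

-- ===== CLAIM (what is proved, stated in full; the proofs are below) =====
def Claim_equal_reformat_points : Prop := ∀ (points : List (Int × Int)), Dom_reformat_points points → Pre_reformat_points points → Spec_reformat_points points (reformat_points points)

-- ===== LEMMAS AND PROOFS =====

-- the four components of the bounding-box fold are the running min/max folds of each coordinate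
theorem bbFold_eq (rest : List (Int × Int)) : ∀ (a b c d : Int),
    rest.foldl bbStep (a, b, c, d) =
      ((rest.map (fun p => p.1)).foldl min a,
       (rest.map (fun p => p.2)).foldl min b,
       (rest.map (fun p => p.1)).foldl max c,
       (rest.map (fun p => p.2)).foldl max d) := by
  induction rest with
  | nil => intro a b c d; rfl
  | cons p t ih =>
    intro a b c d
    simp only [List.foldl_cons, List.map_cons]
    rw [ih]
    congr 1 <;> [skip; congr 1] <;> [skip; skip; congr 1] <;>
      · congr 1
        simp only [bbStep]
        omega

-- first element of sorted(x :: t) is the running-min fold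
theorem sorted_head_eq_foldl_min (x : Int) (t : List Int) :
    PySem.List.pyGetD (PySem.List.sorted (x :: t) (fun v => v) false) 0 0 = t.foldl min x := by
  obtain ⟨s0, s, hs⟩ : ∃ s0 s, PySem.List.sorted (x :: t) (fun v => v) false = s0 :: s := by
    cases hsr : PySem.List.sorted (x :: t) (fun v => v) false with
    | nil => exact absurd ((PySem.List.sorted_eq_nil_iff _ _ false).mp hsr) (by simp)
    | cons s0 s => exact ⟨s0, s, rfl⟩
  rw [hs]
  simp only [PySem.List.pyGetD_zero_cons]
  have hm : PySem.List.min? (x :: t) (fun v => v) = some (t.foldl min x) :=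
    PySem.List.min?_id_cons x t
  have hs0mem : s0 ∈ x :: t := by
    rw [← PySem.List.mem_sorted (x :: t) (fun v => v) false, hs]
    exact List.mem_cons_self
  have hmmem : t.foldl min x ∈ x :: t := PySem.List.min?_mem hm
  have h1 : s0 ≤ t.foldl min x := PySem.List.key_head_sorted_le (x :: t) (fun v => v) hs _ hmmem
  have h2 : t.foldl min x ≤ s0 := PySem.List.min?_isMin hm s0 hs0mem
  omega

-- last element of a sorted 4-element list is the running-max fold
theorem sorted_last_eq_foldl_max (x : Int) (t : List Int) (h : t.length = 3) :
    PySem.List.pyGetD (PySem.List.sorted (x :: t) (fun v => v) false) 3 0 = t.foldl max x := by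
  have hm : PySem.List.max? (x :: t) (fun v => v) = some (t.foldl max x) :=
    PySem.List.max?_id_cons x t
  have hlen : (PySem.List.sorted (x :: t) (fun v => v) false).length = 4 := by
    rw [PySem.List.length_sorted]; simp [h]
  obtain ⟨a0, a1, a2, a3, hs⟩ : ∃ a0 a1 a2 a3,
      PySem.List.sorted (x :: t) (fun v => v) false = [a0, a1, a2, a3] := by
    match hq : PySem.List.sorted (x :: t) (fun v => v) false, hlen with
    | [a0, a1, a2, a3], _ => exact ⟨a0, a1, a2, a3, rfl⟩
  have hpw := PySem.List.sorted_pairwise (x :: t) (fun v => v)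
  rw [hs] at hpw
  have ha3mem : a3 ∈ x :: t := by
    rw [← PySem.List.mem_sorted (x :: t) (fun v => v) false, hs]; simp
  have hmmem : t.foldl max x ∈ [a0, a1, a2, a3] := by
    rw [← hs, PySem.List.mem_sorted]
    exact PySem.List.max?_mem hm
  have h1 : a3 ≤ t.foldl max x := PySem.List.max?_isMax hm a3 ha3mem
  have h2 : t.foldl max x ≤ a3 := by
    simp only [List.pairwise_cons, List.mem_cons, List.not_mem_nil] at hpw
    simp only [List.mem_cons, List.not_mem_nil, or_false] at hmmem
    rcases hmmem with rfl | rfl | rfl | rfl <;>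
      [skip; skip; skip; exact le_refl _] <;>
      · obtain ⟨hA, hB, hC, _⟩ := hpw
        first
        | exact hA a3 (by simp)
        | exact hB a3 (by simp)
        | exact hC a3 (by simp)
  rw [hs]
  have hg : PySem.List.pyGetD [a0, a1, a2, a3] 3 0 = a3 := rfl
  rw [hg]; omega

-- ===== VERDICT (by name: the statement is the Claim_ definition above) =====
theorem reformat_points_spec : Claim_equal_reformat_points := by
  intro points _ hpre
  obtain ⟨p, rest, rfl⟩ : ∃ p rest, points = p :: rest := by
    cases points with
    | nil => exact absurd hpre (by simp [Pre_reformat_points])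
    | cons p rest => exact ⟨p, rest, rfl⟩
  have hrest : rest.length = 3 := by
    have := hpre; simp [Pre_reformat_points] at this; omega
  obtain ⟨x, y⟩ := p
  unfold Spec_reformat_points reformat_points reformat_points_alt
  dsimp only
  rw [bbFold_eq]
  simp only [List.map_cons]
  rw [sorted_head_eq_foldl_min x (rest.map (fun p => p.1)),
      sorted_head_eq_foldl_min y (rest.map (fun p => p.2)),
      sorted_last_eq_foldl_max x (rest.map (fun p => p.1)) (by simp [hrest]),
      sorted_last_eq_foldl_max y (rest.map (fun p => p.2)) (by simp [hrest])]
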